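-- pv_equiv track=rewrite | github.com/k-harada/AtCoder | ABC/ABC251-300/ABC268/E.py | solve_greed
-- ===== SOURCE A (Python) =====
-- def solve_greed(n, p_list):
--     res = n * n
--     for r in range(n):
--         d = 0
--         for i, p in enumerate(p_list):
--             d += min((p - i - r) % n, (-(p - i - r)) % n)
--         res = min(res, d)
--     return res
-- ===== SOURCE B (Python) =====
-- def solve_greed(n, p_list):
--     res = n * n
--     if n <= 0:
--         return res
--     cnt = [0] * n
--     for i, p in enumerate(p_list):
--         cnt[(p - i) % n] += 1
--     L = len(p_list)
--     h = n // 2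
--     d = 0
--     for v in range(n):
--         d += cnt[v] * min(v, n - v)
--     w = 0
--     for v in range(n):
--         if 1 <= v <= h:
--             w += cnt[v]
--     res = min(res, d)
--     for r in range(n - 1):
--         wm = cnt[(r + h + 1) % n] if n % 2 == 1 else 0
--         d += L - 2 * w - wm
--         res = min(res, d)
--         w += cnt[(r + h + 1) % n] - cnt[(r + 1) % n]
--     return res
-- ===== Notes on version B (the rewrite author's own statement) =====
-- stated objective: faster
-- what changed: Replaces A's O(n*len) double loop (recomputing every circular distance for each rotation r) by a single residue-counting pass plus an O(n) sliding-window recurrence that updates the distance sum from r to r+1 in O(1).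
import Mathlib
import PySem

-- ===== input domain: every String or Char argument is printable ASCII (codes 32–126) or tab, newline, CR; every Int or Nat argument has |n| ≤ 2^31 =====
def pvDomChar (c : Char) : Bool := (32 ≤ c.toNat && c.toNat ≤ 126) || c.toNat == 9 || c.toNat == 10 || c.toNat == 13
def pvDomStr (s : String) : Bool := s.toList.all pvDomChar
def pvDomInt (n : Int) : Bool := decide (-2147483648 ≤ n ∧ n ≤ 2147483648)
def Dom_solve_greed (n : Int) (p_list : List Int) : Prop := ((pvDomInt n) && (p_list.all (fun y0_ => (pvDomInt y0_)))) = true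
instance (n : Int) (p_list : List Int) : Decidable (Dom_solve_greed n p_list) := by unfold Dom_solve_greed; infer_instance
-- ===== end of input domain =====

-- B replaces A's O(n·len) double loop by an O(n+len) residue-count + sliding-window recurrence over rotations (measured asymptotically faster).


-- ===== PORT A =====
def solve_greed (n : Int) (p_list : List Int) : Int :=
  (PySem.List.pyRange 0 n).foldl
    (fun res r =>
      min res ((PySem.List.enumerate p_list).foldl
        (fun d ip =>
          d + min (PySem.Int.mod (ip.2 - ip.1 - r) n) (PySem.Int.mod (-(ip.2 - ip.1 - r)) n)) 0))
    (n * n)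

-- ===== PORT B =====
-- the residue-counting pass of B ('cnt' in Source B), kept as a named helper
def solve_greed_alt_cnt (n : Int) (p_list : List Int) : List Int :=
  (PySem.List.enumerate p_list).foldl
    (fun c ip =>
      PySem.List.pySetD c (PySem.Int.mod (ip.2 - ip.1) n)
        (PySem.List.pyGetD c (PySem.Int.mod (ip.2 - ip.1) n) 0 + 1))
    (List.replicate n.toNat (0 : Int))

def solve_greed_alt (n : Int) (p_list : List Int) : Int :=
  let res := n * n
  if n ≤ 0 then res
  else
    let cnt := solve_greed_alt_cnt n p_list
    let L : Int := p_list.length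
    let h := PySem.Int.floordiv n 2
    let d := (PySem.List.pyRange 0 n).foldl
      (fun d v => d + PySem.List.pyGetD cnt v 0 * min v (n - v)) 0
    let w := (PySem.List.pyRange 0 n).foldl
      (fun w v => if 1 ≤ v ∧ v ≤ h then w + PySem.List.pyGetD cnt v 0 else w) 0
    let res := min res d
    ((PySem.List.pyRange 0 (n - 1)).foldl
      (fun (st : Int × Int × Int) r =>
        let wm := if PySem.Int.mod n 2 = 1 then PySem.List.pyGetD cnt (PySem.Int.mod (r + h + 1) n) 0 else 0
        let d' := st.2.1 + L - 2 * st.2.2 - wm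
        let res' := min st.1 d'
        let w' := st.2.2 + PySem.List.pyGetD cnt (PySem.Int.mod (r + h + 1) n) 0
                  - PySem.List.pyGetD cnt (PySem.Int.mod (r + 1) n) 0
        (res', d', w'))
      (res, d, w)).1

-- ===== PRECONDITION & SPEC =====
def Spec_solve_greed (n : Int) (p_list : List Int) (out : Int) : Prop := out = solve_greed_alt n p_list
instance (n : Int) (p_list : List Int) (out : Int) : Decidable (Spec_solve_greed n p_list out) := by unfold Spec_solve_greed; infer_instance

-- ===== CLAIM (what is proved, stated in full; the proofs are below) =====
def Claim_equal_solve_greed : Prop := ∀ (n : Int) (p_list : List Int), Dom_solve_greed n p_list → Spec_solve_greed n p_list (solve_greed n p_list)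

-- ===== LEMMAS AND PROOFS =====


lemma pvCong' (n a b : Int) (h : n ∣ (a - b)) : a % n = b % n := by
  rw [Int.emod_eq_emod_iff_emod_sub_eq_zero]
  exact Int.emod_eq_zero_of_dvd h

lemma pvSelf (n x : Int) : n ∣ (x - x % n) := ⟨x / n, by have := Int.emod_add_mul_ediv x n; linarith⟩

lemma pvIdx_iff (n a r c : Int) (hn : 0 < n) (ha0 : 0 ≤ a) (ha1 : a < n)
    (hc0 : 0 ≤ c) (hc1 : c < n) :
    (a = (r + c) % n) ↔ (a - r) % n = c := by
  constructor
  · intro h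
    have h1 : (a - r) % n = ((r + c) % n - r) % n := by rw [h]
    rw [h1]
    have h2 : ((r + c) % n - r) % n = c % n := by
      apply pvCong'
      obtain ⟨k, hk⟩ := pvSelf n (r + c)
      exact ⟨-k, by linarith⟩
    rw [h2]; exact Int.emod_eq_of_lt hc0 hc1
  · intro h
    have h2 : (r + c) % n = a % n := by
      apply pvCong'
      obtain ⟨k, hk⟩ := pvSelf n (a - r)
      rw [h] at hk
      exact ⟨-k, by linarith⟩
    rw [h2, Int.emod_eq_of_lt ha0 ha1]

lemma pvMid_iff (n a r : Int) (hn : 2 ≤ n) (hodd : n % 2 = 1) (ha0 : 0 ≤ a) (ha1 : a < n) :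
    (2 * ((a - r) % n) = n + 1) ↔ a = (r + n / 2 + 1) % n := by
  have hh : 2 * (n / 2) = n - 1 := by omega
  have h3 : 3 ≤ n := by omega
  have hi := pvIdx_iff n a r (n / 2 + 1) (by omega) ha0 ha1 (by omega) (by omega)
  rw [show r + n / 2 + 1 = r + (n / 2 + 1) by ring, hi]
  omega

lemma pvMid_even (n a r : Int) (heven : n % 2 = 0) :
    ¬ (2 * ((a - r) % n) = n + 1) := by omega

lemma pvNegMod (n x : Int) (hn : 0 < n) :
    (-x) % n = if x % n = 0 then 0 else n - x % n := by
  have hb0 : 0 ≤ x % n := Int.emod_nonneg _ (by omega)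
  have hb1 : x % n < n := Int.emod_lt_of_pos _ hn
  have h : (-x) % n = (n - x % n) % n := by
    apply pvCong'
    obtain ⟨k, hk⟩ := pvSelf n x
    exact ⟨-k - 1, by linarith⟩
  rw [h]
  split_ifs with h0
  · rw [h0, sub_zero, Int.emod_self]
  · exact Int.emod_eq_of_lt (by omega) (by omega)

lemma pvPred (n x : Int) (hn : 2 ≤ n) :
    (x - 1) % n = if x % n = 0 then n - 1 else x % n - 1 := by
  have hb0 : 0 ≤ x % n := Int.emod_nonneg _ (by omega)
  have hb1 : x % n < n := Int.emod_lt_of_pos _ (by omega)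
  have h : (x - 1) % n = (x % n - 1) % n := by
    apply pvCong'
    obtain ⟨k, hk⟩ := pvSelf n x
    exact ⟨k, by linarith⟩
  rw [h]
  split_ifs with h0
  · rw [h0]
    have h1 : ((0:Int) - 1) % n = (n - 1) % n := by
      apply pvCong'; exact ⟨-1, by ring⟩
    rw [h1]; exact Int.emod_eq_of_lt (by omega) (by omega)
  · exact Int.emod_eq_of_lt (by omega) (by omega)

def pvDist (n a r : Int) : Int := min ((a - r) % n) ((r - a) % n)
def pvRes (n : Int) (p_list : List Int) : List Int :=
  (PySem.List.enumerate p_list).map (fun ip => (ip.2 - ip.1) % n)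
def pvS (n : Int) (as : List Int) (r : Int) : Int := (as.map (fun a => pvDist n a r)).sum
def pvW (n : Int) (as : List Int) (r : Int) : Int :=
  (as.map (fun a => if 1 ≤ (a - r) % n ∧ 2 * ((a - r) % n) ≤ n then (1 : Int) else 0)).sum

lemma pvDist_step (n a r : Int) (hn : 2 ≤ n) :
    pvDist n a (r + 1) = pvDist n a r + 1
      - 2 * (if 1 ≤ (a - r) % n ∧ 2 * ((a - r) % n) ≤ n then 1 else 0)
      - (if 2 * ((a - r) % n) = n + 1 then 1 else 0) := by
  have hn0 : (0 : Int) < n := by omega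
  have hb0 : 0 ≤ (a - r) % n := Int.emod_nonneg _ (by omega)
  have hb1 : (a - r) % n < n := Int.emod_lt_of_pos _ hn0
  have er : (r - a) % n = if (a - r) % n = 0 then 0 else n - (a - r) % n := by
    rw [show r - a = -(a - r) by ring, pvNegMod n (a - r) hn0]
  have e2 : (a - (r + 1)) % n = if (a - r) % n = 0 then n - 1 else (a - r) % n - 1 := by
    rw [show a - (r + 1) = (a - r) - 1 by ring, pvPred n (a - r) hn]
  have e4 : ((r + 1) - a) % n
      = if (a - (r + 1)) % n = 0 then 0 else n - (a - (r + 1)) % n := by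
    rw [show (r + 1) - a = -(a - (r + 1)) by ring, pvNegMod n (a - (r + 1)) hn0]
  unfold pvDist
  rw [e4, e2, er]
  split_ifs <;> omega

lemma pvWin_step (n a r : Int) (hn : 2 ≤ n) (ha0 : 0 ≤ a) (ha1 : a < n) :
    (if 1 ≤ (a - (r + 1)) % n ∧ 2 * ((a - (r + 1)) % n) ≤ n then (1 : Int) else 0)
      = (if 1 ≤ (a - r) % n ∧ 2 * ((a - r) % n) ≤ n then 1 else 0)
        + (if a = (r + n / 2 + 1) % n then 1 else 0) - (if a = (r + 1) % n then 1 else 0) := by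
  have hn0 : (0 : Int) < n := by omega
  have hb0 : 0 ≤ (a - r) % n := Int.emod_nonneg _ (by omega)
  have hb1 : (a - r) % n < n := Int.emod_lt_of_pos _ hn0
  have e2 : (a - (r + 1)) % n = if (a - r) % n = 0 then n - 1 else (a - r) % n - 1 := by
    rw [show a - (r + 1) = (a - r) - 1 by ring, pvPred n (a - r) hn]
  have i1 : (a = (r + 1) % n) ↔ (a - r) % n = 1 :=
    pvIdx_iff n a r 1 hn0 ha0 ha1 (by omega) (by omega)
  by_cases hc : n / 2 + 1 < n
  · have i2 : (a = (r + n / 2 + 1) % n) ↔ (a - r) % n = n / 2 + 1 := by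
      rw [show r + n / 2 + 1 = r + (n / 2 + 1) by ring]
      exact pvIdx_iff n a r (n / 2 + 1) hn0 ha0 ha1 (by omega) hc
    rw [e2]
    simp only [i1, i2]
    split_ifs <;> omega
  · have hn2 : n = 2 := by omega
    have hrw : (r + n / 2 + 1) % n = (r + 0) % n := by
      apply pvCong'
      exact ⟨1, by omega⟩
    have i2 : (a = (r + n / 2 + 1) % n) ↔ (a - r) % n = 0 := by
      rw [hrw]
      exact pvIdx_iff n a r 0 hn0 ha0 ha1 (by omega) (by omega)
    rw [e2]
    simp only [i1, i2]
    split_ifs <;> omega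

lemma pvS_step (n : Int) (as : List Int) (r : Int) (hn : 2 ≤ n)
    (Has : ∀ a ∈ as, 0 ≤ a ∧ a < n) :
    pvS n as (r + 1) = pvS n as r + as.length - 2 * pvW n as r
      - (if n % 2 = 1 then (as.count ((r + n / 2 + 1) % n) : Int) else 0) := by
  induction as with
  | nil => simp [pvS, pvW]
  | cons a as ih =>
    obtain ⟨ha0, ha1⟩ := Has a (List.mem_cons_self)
    have ih' := ih (fun a h => Has a (List.mem_cons_of_mem _ h))
    simp only [pvS, pvW, List.map_cons, List.sum_cons, List.count_cons, List.length_cons] at *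
    rw [pvDist_step n a r hn, ih']
    by_cases ho : n % 2 = 1
    · simp only [ho, if_true, pvMid_iff n a r hn ho ha0 ha1]
      by_cases he : a = (r + n / 2 + 1) % n <;> simp [he] <;> push_cast <;> ring_nf <;> omega
    · have he : n % 2 = 0 := by omega
      simp only [if_neg (pvMid_even n a r he), ho, if_false]
      push_cast; ring

lemma pvW_step (n : Int) (as : List Int) (r : Int) (hn : 2 ≤ n)
    (Has : ∀ a ∈ as, 0 ≤ a ∧ a < n) :
    pvW n as (r + 1) = pvW n as r + (as.count ((r + n / 2 + 1) % n) : Int)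
      - (as.count ((r + 1) % n) : Int) := by
  induction as with
  | nil => simp [pvW]
  | cons a as ih =>
    obtain ⟨ha0, ha1⟩ := Has a (List.mem_cons_self)
    have ih' := ih (fun a h => Has a (List.mem_cons_of_mem _ h))
    simp only [pvW, List.map_cons, List.sum_cons, List.count_cons] at *
    rw [pvWin_step n a r hn ha0 ha1, ih']
    by_cases h1 : a = (r + n / 2 + 1) % n <;> by_cases h2 : a = (r + 1) % n <;>
      simp [h1, h2] <;> ring_nf


lemma pvRange_single (n a : Int) (g : Int → Int) (ha0 : 0 ≤ a) (ha1 : a < n) :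
    ((PySem.List.pyRange 0 n).map (fun v => if a = v then g v else 0)).sum = g a := by
  rw [PySem.List.pyRange_one_append 0 a n ha0 (le_of_lt ha1),
      PySem.List.pyRange_one_cons ha1]
  simp only [List.map_append, List.sum_append, List.map_cons, List.sum_cons]
  have h1 : ((PySem.List.pyRange 0 a).map (fun v => if a = v then g v else 0)).sum = 0 := by
    apply List.sum_eq_zero
    intro x hx
    obtain ⟨v, hv, rfl⟩ := List.mem_map.mp hx
    rw [PySem.List.mem_pyRange_one] at hv
    rw [if_neg (by omega)]
  have h2 : ((PySem.List.pyRange (a + 1) n).map (fun v => if a = v then g v else 0)).sum = 0 := by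
    apply List.sum_eq_zero
    intro x hx
    obtain ⟨v, hv, rfl⟩ := List.mem_map.mp hx
    rw [PySem.List.mem_pyRange_one] at hv
    rw [if_neg (by omega)]
  rw [h1, h2]; simp

lemma pvExchange (n : Int) (g : Int → Int) (as : List Int)
    (Has : ∀ a ∈ as, 0 ≤ a ∧ a < n) :
    ((PySem.List.pyRange 0 n).map (fun v => (as.count v : Int) * g v)).sum = (as.map g).sum := by
  induction as with
  | nil => simp
  | cons a as ih =>
    obtain ⟨ha0, ha1⟩ := Has a (List.mem_cons_self)
    have ih' := ih (fun a h => Has a (List.mem_cons_of_mem _ h))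
    have hsplit : ((PySem.List.pyRange 0 n).map (fun v => ((a :: as).count v : Int) * g v))
        = ((PySem.List.pyRange 0 n).map (fun v => (as.count v : Int) * g v + (if a = v then g v else 0))) := by
      apply List.map_congr_left
      intro v _
      simp only [List.count_cons]
      by_cases h : a = v <;> simp [h] <;> push_cast <;> ring
    rw [hsplit, PySem.List.sum_map_add_int, ih', pvRange_single n a g ha0 ha1]
    simp [add_comm]



lemma pvCnt_spec (n : Int) (hn : 0 < n) (l : List Int) (s : Int) (acc : List Int)
    (hlen : acc.length = n.toNat) (v : Int) (hv0 : 0 ≤ v) (hv1 : v < n) :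
    PySem.List.pyGetD ((PySem.List.enumerate l s).foldl
      (fun c ip => PySem.List.pySetD c (PySem.Int.mod (ip.2 - ip.1) n)
        (PySem.List.pyGetD c (PySem.Int.mod (ip.2 - ip.1) n) 0 + 1)) acc) v 0
    = PySem.List.pyGetD acc v 0
      + (((PySem.List.enumerate l s).map (fun ip => (ip.2 - ip.1) % n)).count v : Int) := by
  induction l generalizing s acc with
  | nil => simp [PySem.List.enumerate_nil]
  | cons p l ih =>
    rw [PySem.List.enumerate_cons]
    simp only [List.foldl_cons, List.map_cons, List.count_cons]
    have ha0 : 0 ≤ (p - s) % n := Int.emod_nonneg _ (by omega)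
    have ha1 : (p - s) % n < n := Int.emod_lt_of_pos _ hn
    set a := (p - s) % n with hadef
    have hmod : PySem.Int.mod ((s, p).2 - (s, p).1) n = a := by
      rw [PySem.Int.mod_eq_emod_of_pos hn]
    rw [hmod]
    set acc' := PySem.List.pySetD acc a (PySem.List.pyGetD acc a 0 + 1) with hacc'
    have hlen' : acc'.length = n.toNat := by
      rw [hacc', PySem.List.length_pySetD, hlen]
    rw [ih (s + 1) acc' hlen']
    have hget : PySem.List.pyGetD acc' v 0
        = if v = a then PySem.List.pyGetD acc a 0 + 1 else PySem.List.pyGetD acc v 0 := by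
      rw [hacc', PySem.List.pySetD_of_nonneg _ _ ha0]
      have hls : (acc.set a.toNat (PySem.List.pyGetD acc a 0 + 1)).length = acc.length :=
        List.length_set ..
      rw [PySem.List.pyGetD_eq_getElem _ _ hv0 (by simp only [hls]; omega)]
      rw [List.getElem_set]
      by_cases h : v = a
      · rw [if_pos (by omega), if_pos h]
      · rw [if_neg (by omega), if_neg h,
          PySem.List.pyGetD_eq_getElem _ _ hv0 (by omega)]
    rw [hget]
    by_cases h : v = a
    · rw [if_pos h, if_pos (by rw [h]; exact (beq_iff_eq).mpr rfl), h]
      push_cast; ring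
    · rw [if_neg h, if_neg (by simp [beq_iff_eq]; omega)]
      push_cast; ring

-- B's main fold computes the running minimum of pvS over rotations r+1..n-1
lemma pvLoop (n : Int) (as cnt : List Int) (L h : Int) (hn : 0 < n)
    (hL : L = (as.length : Int)) (hh : h = n / 2)
    (Has : ∀ a ∈ as, 0 ≤ a ∧ a < n)
    (Hcnt : ∀ v, 0 ≤ v → v < n → PySem.List.pyGetD cnt v 0 = (as.count v : Int)) :
    ∀ (k : Nat) (r res : Int), 0 ≤ r → r + k = n - 1 →
    ((PySem.List.pyRange r (n - 1)).foldl
      (fun (st : Int × Int × Int) r =>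
        let wm := if PySem.Int.mod n 2 = 1 then PySem.List.pyGetD cnt (PySem.Int.mod (r + h + 1) n) 0 else 0
        let d' := st.2.1 + L - 2 * st.2.2 - wm
        let res' := min st.1 d'
        let w' := st.2.2 + PySem.List.pyGetD cnt (PySem.Int.mod (r + h + 1) n) 0
                  - PySem.List.pyGetD cnt (PySem.Int.mod (r + 1) n) 0
        (res', d', w'))
      (res, pvS n as r, pvW n as r)).1
    = (PySem.List.pyRange (r + 1) n).foldl (fun acc r' => min acc (pvS n as r')) res := by
  intro k
  induction k with
  | zero =>
    intro r res hr0 hrk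
    rw [PySem.List.pyRange_one_eq_nil (by omega), PySem.List.pyRange_one_eq_nil (by omega)]
    rfl
  | succ k ih =>
    intro r res hr0 hrk
    have hrlt : r < n - 1 := by push_cast at hrk; omega
    have hn2 : 2 ≤ n := by omega
    have hmod2 : PySem.Int.mod n 2 = n % 2 := PySem.Int.mod_eq_emod_of_pos (by omega)
    have hmodi : PySem.Int.mod (r + h + 1) n = (r + n / 2 + 1) % n := by
      rw [PySem.Int.mod_eq_emod_of_pos hn, hh]
    have hmodr : PySem.Int.mod (r + 1) n = (r + 1) % n := PySem.Int.mod_eq_emod_of_pos hn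
    have hbi0 : 0 ≤ (r + n / 2 + 1) % n := Int.emod_nonneg _ (by omega)
    have hbi1 : (r + n / 2 + 1) % n < n := Int.emod_lt_of_pos _ hn
    have hbr0 : 0 ≤ (r + 1) % n := Int.emod_nonneg _ (by omega)
    have hbr1 : (r + 1) % n < n := Int.emod_lt_of_pos _ hn
    have hd' : pvS n as r + L - 2 * pvW n as r
          - (if PySem.Int.mod n 2 = 1 then PySem.List.pyGetD cnt (PySem.Int.mod (r + h + 1) n) 0 else 0)
        = pvS n as (r + 1) := by
      rw [hmod2, hmodi, Hcnt _ hbi0 hbi1, hL, pvS_step n as r hn2 Has]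
    have hw' : pvW n as r + PySem.List.pyGetD cnt (PySem.Int.mod (r + h + 1) n) 0
          - PySem.List.pyGetD cnt (PySem.Int.mod (r + 1) n) 0
        = pvW n as (r + 1) := by
      rw [hmodi, hmodr, Hcnt _ hbi0 hbi1, Hcnt _ hbr0 hbr1, pvW_step n as r hn2 Has]
    rw [PySem.List.pyRange_one_cons hrlt, List.foldl_cons]
    dsimp only
    rw [hd', hw', ih (r + 1) (min res (pvS n as (r + 1))) (by omega) (by push_cast at hrk; omega)]
    rw [PySem.List.pyRange_one_cons (show r + 1 < n by omega), List.foldl_cons]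

-- ===== VERDICT (by name: the statement is the Claim_ definition above) =====


lemma pvModSub (n x r : Int) (hn : 0 < n) : (x - r) % n = (x % n - r) % n := by
  apply pvCong'
  obtain ⟨k, hk⟩ := pvSelf n x
  exact ⟨k, by linarith⟩

lemma pvTermA (n x r : Int) (hn : 0 < n) :
    min (PySem.Int.mod (x - r) n) (PySem.Int.mod (-(x - r)) n)
      = pvDist n (x % n) r := by
  unfold pvDist
  rw [PySem.Int.mod_eq_emod_of_pos hn, PySem.Int.mod_eq_emod_of_pos hn]
  rw [pvModSub n x r hn]
  congr 1
  apply pvCong'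
  obtain ⟨k, hk⟩ := pvSelf n x
  exact ⟨-k, by linarith⟩

lemma pvHas (n : Int) (p_list : List Int) (hn : 0 < n) :
    ∀ a ∈ pvRes n p_list, 0 ≤ a ∧ a < n := by
  intro a ha
  obtain ⟨ip, _, rfl⟩ := List.mem_map.mp ha
  exact ⟨Int.emod_nonneg _ (by omega), Int.emod_lt_of_pos _ hn⟩

lemma pvLen (n : Int) (p_list : List Int) :
    ((p_list.length : Int)) = ((pvRes n p_list).length : Int) := by
  simp [pvRes, PySem.List.length_enumerate]

lemma pvHcnt (n : Int) (p_list : List Int) (hn : 0 < n) :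
    ∀ v, 0 ≤ v → v < n →
      PySem.List.pyGetD (solve_greed_alt_cnt n p_list) v 0 = ((pvRes n p_list).count v : Int) := by
  intro v hv0 hv1
  unfold solve_greed_alt_cnt
  rw [pvCnt_spec n hn p_list 0 (List.replicate n.toNat 0) (by simp) v hv0 hv1]
  have hrep : PySem.List.pyGetD (List.replicate n.toNat (0 : Int)) v 0 = 0 := by
    rw [PySem.List.pyGetD_eq_getElem _ _ hv0 (by simp; omega)]
    exact List.getElem_replicate _
  rw [hrep, zero_add]
  rfl

lemma pvInnerA (n r : Int) (p_list : List Int) (hn : 0 < n) :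
    (PySem.List.enumerate p_list).foldl
      (fun d ip => d + min (PySem.Int.mod (ip.2 - ip.1 - r) n) (PySem.Int.mod (-(ip.2 - ip.1 - r)) n)) 0
    = pvS n (pvRes n p_list) r := by
  rw [PySem.List.foldl_add, zero_add]
  unfold pvS pvRes
  rw [List.map_map]
  congr 1
  apply List.map_congr_left
  intro ip _
  exact pvTermA n (ip.2 - ip.1) r hn

lemma pvDist0 (n a : Int) (hn : 0 < n) (ha0 : 0 ≤ a) (ha1 : a < n) :
    pvDist n a 0 = min a (n - a) := by
  unfold pvDist
  rw [show a - 0 = a by ring, show (0 : Int) - a = -a by ring,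
      pvNegMod n a hn, Int.emod_eq_of_lt ha0 ha1]
  split_ifs <;> omega

lemma pvD0 (n : Int) (p_list : List Int) (hn : 0 < n) :
    (PySem.List.pyRange 0 n).foldl
      (fun d v => d + PySem.List.pyGetD (solve_greed_alt_cnt n p_list) v 0 * min v (n - v)) 0
    = pvS n (pvRes n p_list) 0 := by
  rw [PySem.List.foldl_add, zero_add]
  have h1 : (PySem.List.pyRange 0 n).map
        (fun v => PySem.List.pyGetD (solve_greed_alt_cnt n p_list) v 0 * min v (n - v))
      = (PySem.List.pyRange 0 n).map (fun v => (((pvRes n p_list).count v : Int)) * min v (n - v)) := by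
    apply List.map_congr_left
    intro v hv
    rw [PySem.List.mem_pyRange_one] at hv
    rw [pvHcnt n p_list hn v hv.1 hv.2]
  rw [h1, pvExchange n (fun v => min v (n - v)) (pvRes n p_list) (pvHas n p_list hn)]
  unfold pvS
  apply congrArg
  apply List.map_congr_left
  intro a ha
  obtain ⟨ha0, ha1⟩ := pvHas n p_list hn a ha
  exact (pvDist0 n a hn ha0 ha1).symm

lemma pvW0 (n : Int) (p_list : List Int) (hn : 0 < n) :
    (PySem.List.pyRange 0 n).foldl
      (fun w v => if 1 ≤ v ∧ v ≤ PySem.Int.floordiv n 2 then w + PySem.List.pyGetD (solve_greed_alt_cnt n p_list) v 0 else w) 0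
    = pvW n (pvRes n p_list) 0 := by
  have hfd : PySem.Int.floordiv n 2 = n / 2 := PySem.Int.floordiv_eq_ediv_of_pos (by omega)
  have hfun : (fun (w v : Int) => if 1 ≤ v ∧ v ≤ PySem.Int.floordiv n 2 then w + PySem.List.pyGetD (solve_greed_alt_cnt n p_list) v 0 else w)
      = (fun (w v : Int) => w + if 1 ≤ v ∧ v ≤ PySem.Int.floordiv n 2 then PySem.List.pyGetD (solve_greed_alt_cnt n p_list) v 0 else 0) := by
    funext w v
    split_ifs <;> ring
  rw [hfun, PySem.List.foldl_add, zero_add]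
  have h1 : (PySem.List.pyRange 0 n).map
        (fun v => if 1 ≤ v ∧ v ≤ PySem.Int.floordiv n 2 then PySem.List.pyGetD (solve_greed_alt_cnt n p_list) v 0 else 0)
      = (PySem.List.pyRange 0 n).map
        (fun v => (((pvRes n p_list).count v : Int)) * (if 1 ≤ v ∧ 2 * v ≤ n then 1 else 0)) := by
    apply List.map_congr_left
    intro v hv
    rw [PySem.List.mem_pyRange_one] at hv
    rw [hfd]
    by_cases h : 1 ≤ v ∧ v ≤ n / 2
    · rw [if_pos h, if_pos (by omega), pvHcnt n p_list hn v hv.1 hv.2]; ring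
    · rw [if_neg h, if_neg (by omega)]; ring
  rw [h1, pvExchange n (fun v => if 1 ≤ v ∧ 2 * v ≤ n then 1 else 0) (pvRes n p_list) (pvHas n p_list hn)]
  unfold pvW
  apply congrArg
  apply List.map_congr_left
  intro a ha
  obtain ⟨ha0, ha1⟩ := pvHas n p_list hn a ha
  rw [show a - 0 = a by ring, Int.emod_eq_of_lt ha0 ha1]

theorem solve_greed_spec : Claim_equal_solve_greed := by
  intro n p_list _
  unfold Spec_solve_greed
  by_cases hn : n ≤ 0
  · simp only [solve_greed, solve_greed_alt, if_pos hn,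
      PySem.List.pyRange_one_eq_nil hn, List.foldl_nil]
  · have hn0 : 0 < n := by omega
    simp only [solve_greed, solve_greed_alt, if_neg hn]
    have hA : (fun (res r : Int) =>
        min res ((PySem.List.enumerate p_list).foldl
          (fun d ip => d + min (PySem.Int.mod (ip.2 - ip.1 - r) n) (PySem.Int.mod (-(ip.2 - ip.1 - r)) n)) 0))
        = (fun (res r : Int) => min res (pvS n (pvRes n p_list) r)) := by
      funext res r
      rw [pvInnerA n r p_list hn0]
    rw [hA, pvD0 n p_list hn0, pvW0 n p_list hn0]
    rw [PySem.List.pyRange_one_cons hn0, List.foldl_cons]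
    rw [pvLoop n (pvRes n p_list) (solve_greed_alt_cnt n p_list) (p_list.length) (PySem.Int.floordiv n 2) hn0
      (pvLen n p_list) (PySem.Int.floordiv_eq_ediv_of_pos (by omega))
      (pvHas n p_list hn0) (pvHcnt n p_list hn0)
      (n - 1).toNat 0 (min (n * n) (pvS n (pvRes n p_list) 0)) (le_refl 0) (by omega)]
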